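-- pv_equiv track=rewrite | github.com/Pluglug/modular-renamer | utils/strings_utils.py | is_pascal_case
-- ===== SOURCE A (Python) =====
-- def is_pascal_case(name: str) -> bool:
--     """
--     より厳密なパスカルケースチェック
--
--     条件：
--     1. 先頭が大文字
--     2. 続く文字は小文字または大文字
--     3. 連続する大文字は許可しない（略語を除く）
--     4. 数字、アンダースコア、その他の文字は不許可
--
--     Examples:
--         >>> is_pascal_case("BlenderCounter")     # True
--         >>> is_pascal_case("XMLParser")          # True  (略語OK)
--         >>> is_pascal_case("blenderCounter")     # False (先頭小文字)
--         >>> is_pascal_case("Blender_Counter")    # False (アンダースコア)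
--         >>> is_pascal_case("BLENDERCounter")     # False (連続大文字)
--         >>> is_pascal_case("Blender2Counter")    # False (数字)
--     """
--     if not name or len(name) < 2:
--         return False
--
--     # 先頭が大文字で始まるか
--     if not name[0].isupper():
--         return False
--
--     # アルファベットのみか
--     if not name.isalpha():
--         return False
--
--     # 連続する大文字をチェック（略語は例外）
--     upper_count = 0
--     prev_is_upper = True  # 最初の文字は大文字なので True で開始
--
--     for c in name[1:]:
--         is_upper = c.isupper()
--
--         if is_upper:
--             upper_count += 1
--             if not prev_is_upper:  # 新しい単語の開始
--                 upper_count = 1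
--         else:
--             if prev_is_upper and upper_count > 1:  # 略語の終わり
--                 if upper_count > 5:  # 略語が長すぎる
--                     return False
--             upper_count = 0
--
--         prev_is_upper = is_upper
--
--     # 最後の文字が大文字で終わる場合のチェック
--     if prev_is_upper and upper_count > 5:
--         return False
--
--     return True
-- ===== SOURCE B (Python) =====
-- def is_pascal_case(name: str) -> bool:
--     # Run-based check: scan maximal uppercase runs; the leading run may be one
--     # longer (its first char is the PascalCase initial), any run of effective
--     # length > 5 rejects.
--     if not name or len(name) < 2:
--         return False
--     if not name[0].isupper():
--         return False
--     if not name.isalpha():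
--         return False
--     i, n = 0, len(name)
--     while i < n:
--         if name[i].isupper():
--             j = i
--             while j < n and name[j].isupper():
--                 j += 1
--             run = j - i
--             if i == 0:
--                 run -= 1
--             if run > 5:
--                 return False
--             i = j
--         else:
--             i += 1
--     return True
-- ===== Notes on version B (the rewrite author's own statement) =====
-- stated objective: alternative
-- what changed: Replaced the char-by-char state machine (upper_count/prev_is_upper with resets) by a scan over maximal uppercase runs: each run's length is measured directly (the leading run counted one shorter) and compared against 5.
import Mathlib
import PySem

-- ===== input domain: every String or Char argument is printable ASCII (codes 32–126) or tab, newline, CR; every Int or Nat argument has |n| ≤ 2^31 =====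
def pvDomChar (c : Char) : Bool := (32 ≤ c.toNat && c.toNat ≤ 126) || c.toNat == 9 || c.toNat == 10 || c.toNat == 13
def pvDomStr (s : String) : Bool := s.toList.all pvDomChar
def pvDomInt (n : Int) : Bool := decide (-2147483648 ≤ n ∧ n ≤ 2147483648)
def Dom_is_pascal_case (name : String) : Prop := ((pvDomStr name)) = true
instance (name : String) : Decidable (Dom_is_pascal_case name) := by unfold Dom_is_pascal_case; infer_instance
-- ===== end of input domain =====

-- B replaces A's char-by-char state machine by a scan over maximal uppercase runs
-- (the leading run counted one shorter); same cost, different decomposition.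

-- ===== PORT A =====
-- A's loop over name[1:] with state (upper_count, prev_is_upper); the base case is
-- the post-loop check, early 'return False' is the literal false branch.
def pvALoop (cs : List Char) (upper_count : Int) (prev_is_upper : Bool) : Bool :=
  match cs with
  | [] => if prev_is_upper ∧ upper_count > 5 then false else true
  | c :: rest =>
    let is_upper := PySem.Chars.isupper c
    if is_upper then
      let uc := upper_count + 1
      let uc := if !prev_is_upper then 1 else uc
      pvALoop rest uc true
    else
      if prev_is_upper ∧ upper_count > 1 ∧ upper_count > 5 then false
      else pvALoop rest 0 false

def is_pascal_case (name : String) : Bool :=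
  let cs := name.toList
  if cs = [] ∨ cs.length < 2 then false
  else
    match cs with
    | [] => false
    | c0 :: rest =>
      if !(PySem.Chars.isupper c0) then false
      else if !(PySem.Chars.strIsalpha cs) then false
      else pvALoop rest 0 true

-- ===== PORT B =====
-- B's index scan over maximal uppercase runs, as structural recursion;
-- 'first' is B's 'i == 0'.
def pvBLoop (cs : List Char) (first : Bool) : Bool :=
  match cs with
  | [] => true
  | c :: rest =>
    if PySem.Chars.isupper c then
      let run : Int := 1 + (rest.takeWhile PySem.Chars.isupper).length
      let run := if first then run - 1 else run
      if run > 5 then false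
      else pvBLoop (rest.dropWhile PySem.Chars.isupper) false
    else pvBLoop rest false
termination_by cs.length
decreasing_by
  · have := List.length_dropWhile_le (p := PySem.Chars.isupper) (l := rest)
    simp; omega
  · simp

def is_pascal_case_alt (name : String) : Bool :=
  let cs := name.toList
  if cs = [] ∨ cs.length < 2 then false
  else
    match cs with
    | [] => false
    | c0 :: rest =>
      if !(PySem.Chars.isupper c0) then false
      else if !(PySem.Chars.strIsalpha cs) then false
      else pvBLoop (c0 :: rest) true

-- ===== PRECONDITION & SPEC =====
def Spec_is_pascal_case (name : String) (out : Bool) : Prop := out = is_pascal_case_alt name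
instance (name : String) (out : Bool) : Decidable (Spec_is_pascal_case name out) := by unfold Spec_is_pascal_case; infer_instance

-- ===== CLAIM (what is proved, stated in full; the proofs are below) =====
def Claim_equal_is_pascal_case : Prop := ∀ (name : String), Dom_is_pascal_case name → Spec_is_pascal_case name (is_pascal_case name)

-- ===== LEMMAS AND PROOFS =====

-- The two loops agree: with prev_is_upper the state machine's count k plus the
-- length of the pending uppercase run decides the result; with prev false and
-- count 0 the loops coincide.
theorem pvLoops_agree (cs : List Char) :
    (∀ k : Int, 0 ≤ k →
      pvALoop cs k true =
        (if k + ((cs.takeWhile PySem.Chars.isupper).length : Int) > 5 then false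
         else pvBLoop (cs.dropWhile PySem.Chars.isupper) false))
    ∧ pvALoop cs 0 false = pvBLoop cs false := by
  induction cs with
  | nil =>
    refine ⟨fun k hk => ?_, by simp [pvALoop, pvBLoop]⟩
    rw [show pvALoop [] k true = (if k > 5 then false else true) by
      simp [pvALoop]]
    simp only [List.takeWhile_nil, List.dropWhile_nil, List.length_nil,
      Int.natCast_zero, add_zero, pvBLoop]
  | cons c rest ih =>
    by_cases hc : PySem.Chars.isupper c
    · refine ⟨fun k hk => ?_, ?_⟩
      · rw [show pvALoop (c :: rest) k true = pvALoop rest (k + 1) true by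
          simp [pvALoop, hc]]
        rw [ih.1 (k + 1) (by omega)]
        simp only [List.takeWhile_cons, List.dropWhile_cons, hc, if_pos,
          List.length_cons]
        push_cast
        split_ifs <;> first | rfl | omega
      · rw [show pvALoop (c :: rest) 0 false = pvALoop rest 1 true by
          simp [pvALoop, hc]]
        rw [ih.1 1 (by omega)]
        rw [show pvBLoop (c :: rest) false =
            (if (1 : Int) + ((rest.takeWhile PySem.Chars.isupper).length : Int) > 5
             then false else pvBLoop (rest.dropWhile PySem.Chars.isupper) false) by
          simp [pvBLoop, hc]]
    · refine ⟨fun k hk => ?_, ?_⟩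
      · rw [show pvALoop (c :: rest) k true =
            (if k > 1 ∧ k > 5 then false else pvALoop rest 0 false) by
          simp [pvALoop, hc]]
        rw [show (List.takeWhile PySem.Chars.isupper (c :: rest)) = [] by
          simp [hc]]
        rw [show (List.dropWhile PySem.Chars.isupper (c :: rest)) = c :: rest by
          simp [hc]]
        rw [show pvBLoop (c :: rest) false = pvBLoop rest false by
          simp [pvBLoop, hc]]
        rw [ih.2]
        simp only [List.length_nil, Int.natCast_zero, add_zero]
        split_ifs <;> first | rfl | omega
      · rw [show pvALoop (c :: rest) 0 false = pvALoop rest 0 false by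
          simp [pvALoop, hc]]
        rw [show pvBLoop (c :: rest) false = pvBLoop rest false by
          simp [pvBLoop, hc]]
        exact ih.2

-- ===== VERDICT (by name: the statement is the Claim_ definition above) =====
theorem is_pascal_case_spec : Claim_equal_is_pascal_case := by
  intro name _
  unfold Spec_is_pascal_case is_pascal_case is_pascal_case_alt
  cases hcs : name.toList with
  | nil => simp
  | cons c0 rest =>
    by_cases h1 : (c0 :: rest : List Char) = [] ∨ (c0 :: rest).length < 2
    · have hrest : rest = [] := by
        cases h1 with
        | inl h => exact absurd h (by simp)
        | inr h =>
          simp only [List.length_cons] at h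
          exact List.eq_nil_of_length_eq_zero (by omega)
      subst hrest
      simp
    · by_cases h2 : PySem.Chars.isupper c0
      · by_cases h3 : PySem.Chars.strIsalpha (c0 :: rest)
        · simp only [h1, h2, h3, if_false, Bool.not_true, Bool.false_eq_true]
          rw [(pvLoops_agree rest).1 0 (by omega)]
          rw [show pvBLoop (c0 :: rest) true =
              (if (1 + ((rest.takeWhile PySem.Chars.isupper).length : Int)) - 1 > 5
               then false else pvBLoop (rest.dropWhile PySem.Chars.isupper) false) by
            simp [pvBLoop, h2]]
          split_ifs <;> first | rfl | omega
        · simp [h2, h3]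
      · simp [h2]
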